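-- pv_equiv track=rewrite | github.com/Tripudium/lomba | main.py | _linear_neighbors
-- ===== SOURCE A (Python) =====
-- from typing import Dict, List, Optional, Sequence, Tuple, Any
--
-- def _linear_neighbors(num_items: int) -> List[List[int]]:
--     neigh: List[List[int]] = []
--     for i in range(num_items):
--         cur: List[int] = []
--         if i - 1 >= 0:
--             cur.append(i - 1)
--         if i + 1 < num_items:
--             cur.append(i + 1)
--         neigh.append(cur)
--     return neigh
-- ===== SOURCE B (Python) =====
-- from typing import List
--
-- def _linear_neighbors(num_items: int) -> List[List[int]]:
--     # Column-wise construction: build the left-neighbor column and the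
--     # right-neighbor column as two staged lists, then zip-concatenate them.
--     if num_items <= 0:
--         return []
--     lefts: List[List[int]] = [[]] + [[i] for i in range(num_items - 1)]
--     rights: List[List[int]] = [[i + 1] for i in range(num_items - 1)] + [[]]
--     return [l + r for l, r in zip(lefts, rights)]
-- ===== Notes on version B (the rewrite author's own statement) =====
-- stated objective: alternative
-- what changed: Replaces A's single per-node loop with boundary conditionals by a staged column-wise construction: build the complete left-neighbor column and right-neighbor column as two separate lists (with shifted padding) and zip-concatenate them pairwise.
import Mathlib
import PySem

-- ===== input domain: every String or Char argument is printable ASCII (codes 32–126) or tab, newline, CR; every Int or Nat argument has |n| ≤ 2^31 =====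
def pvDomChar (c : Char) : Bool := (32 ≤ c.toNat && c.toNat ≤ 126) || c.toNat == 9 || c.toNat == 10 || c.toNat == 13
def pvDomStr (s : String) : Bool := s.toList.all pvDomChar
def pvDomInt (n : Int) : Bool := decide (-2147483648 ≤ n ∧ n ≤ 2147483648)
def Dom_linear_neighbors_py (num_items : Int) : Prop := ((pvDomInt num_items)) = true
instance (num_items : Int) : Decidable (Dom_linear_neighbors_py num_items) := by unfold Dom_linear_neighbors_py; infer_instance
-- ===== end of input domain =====

-- B replaces A's per-node loop with boundary conditionals by a staged column-wise
-- construction: the left-neighbor and right-neighbor columns are built as two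
-- padded lists and zip-concatenated (alternative decomposition).


-- ===== PORT A =====
def linear_neighbors_py (num_items : Int) : List (List Int) :=
  (PySem.List.pyRange 0 num_items 1).foldl
    (fun neigh i =>
      let cur : List Int := []
      let cur := if i - 1 ≥ 0 then cur ++ [i - 1] else cur
      let cur := if i + 1 < num_items then cur ++ [i + 1] else cur
      neigh ++ [cur])
    []

-- ===== PORT B =====
def linear_neighbors_py_alt (num_items : Int) : List (List Int) :=
  if num_items ≤ 0 then []
  else
    let lefts : List (List Int) :=
      [([] : List Int)] ++ (PySem.List.pyRange 0 (num_items - 1) 1).map (fun i => [i])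
    let rights : List (List Int) :=
      (PySem.List.pyRange 0 (num_items - 1) 1).map (fun i => [i + 1]) ++ [([] : List Int)]
    (lefts.zip rights).map (fun p => p.1 ++ p.2)

-- ===== PRECONDITION & SPEC =====
def Spec_linear_neighbors_py (num_items : Int) (out : List (List Int)) : Prop := out = linear_neighbors_py_alt num_items
instance (num_items : Int) (out : List (List Int)) : Decidable (Spec_linear_neighbors_py num_items out) := by unfold Spec_linear_neighbors_py; infer_instance

-- ===== CLAIM =====
def Claim_equal_linear_neighbors_py : Prop := ∀ (num_items : Int), Dom_linear_neighbors_py num_items → Spec_linear_neighbors_py num_items (linear_neighbors_py num_items)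

-- ===== LEMMAS AND PROOFS =====

-- the neighbor list of node k in a chain of n nodes (the common closed form)
def pvNode (n : Int) (k : Nat) : List Int :=
  (if 1 ≤ k then [(k:Int) - 1] else []) ++ (if (k:Int) + 1 < n then [(k:Int) + 1] else [])

lemma pvA_eq (n : Int) :
    linear_neighbors_py n = (List.range n.toNat).map (pvNode n) := by
  unfold linear_neighbors_py
  rw [PySem.List.foldl_append_singleton_eq_map, PySem.List.pyRange_one]
  simp only [List.map_map, List.nil_append, sub_zero]
  apply List.map_congr_left
  intro k _
  simp only [Function.comp_apply, zero_add, pvNode]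
  by_cases h1 : 1 ≤ k
  · rw [if_pos (by omega : (k:Int) - 1 ≥ 0), if_pos h1]
    by_cases h2 : (k:Int) + 1 < n
    · rw [if_pos h2, if_pos h2]
    · rw [if_neg h2, if_neg h2, List.append_nil]
  · rw [if_neg (by omega : ¬ (k:Int) - 1 ≥ 0), if_neg h1]
    by_cases h2 : (k:Int) + 1 < n
    · rw [if_pos h2, if_pos h2]
    · rw [if_neg h2, if_neg h2, List.append_nil]

lemma pvB_eq (n : Int) (hn : 1 ≤ n) :
    linear_neighbors_py_alt n = (List.range n.toNat).map (pvNode n) := by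
  unfold linear_neighbors_py_alt
  rw [if_neg (by omega)]
  simp only [PySem.List.pyRange_one, sub_zero, List.map_map]
  set m := (n - 1).toNat with hm
  have hnm : n.toNat = m + 1 := by omega
  apply List.ext_getElem
  · simp [List.length_zip, hnm]
  · intro k hk1 hk2
    have hk : k < m + 1 := by
      rw [List.length_map, List.length_range] at hk2; omega
    simp only [List.getElem_map, List.getElem_zip, List.getElem_range]
    have hleft : (([([] : List Int)] ++ (List.range m).map ((fun i => [i]) ∘ fun k => (0:Int) + ↑k))[k]'(by simp; omega))
        = if 1 ≤ k then [(k:Int) - 1] else [] := by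
      rcases k with _ | j
      · simp
      · rw [List.getElem_append_right (by simp)]
        simp
    have hright : (((List.range m).map ((fun i => [i + 1]) ∘ fun k => (0:Int) + ↑k) ++ [([] : List Int)])[k]'(by simp; omega))
        = if (k:Int) + 1 < n then [(k:Int) + 1] else [] := by
      by_cases hkm : k < m
      · rw [List.getElem_append_left (by simp; omega)]
        simp
        omega
      · rw [List.getElem_append_right (by simp; omega)]
        simp
        omega
    rw [hleft, hright]
    rfl

-- ===== VERDICT =====
theorem linear_neighbors_py_spec : Claim_equal_linear_neighbors_py := by
  intro n _
  unfold Spec_linear_neighbors_py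
  by_cases hn : 1 ≤ n
  · rw [pvA_eq, pvB_eq n hn]
  · unfold linear_neighbors_py linear_neighbors_py_alt
    rw [PySem.List.pyRange_one_eq_nil (by omega), if_pos (by omega)]
    simp
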